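-- pv_equiv track=rewrite | github.com/miko7879/programming_problems | Hacker Rank Interview Preparation Kit/Arrays/triplets.py | triplets
-- ===== SOURCE A (Python) =====
-- def triplets(a, b, c):
--     a.sort()
--     b.sort()
--     c.sort()
--     a_ptr, a_count = 0, 0
--     c_ptr, c_count = 0, 0
--     tot_pairs = 0
--     seen = set()
--     for n in b:
--         if n in seen:
--             continue
--         seen.add(n)
--         while a_ptr < len(a) and a[a_ptr] <= n:
--             if a_ptr == 0 or a[a_ptr] != a[a_ptr - 1]:
--                 a_count += 1
--             a_ptr += 1
--         while c_ptr < len(c) and c[c_ptr] <= n: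
--             if c_ptr == 0 or c[c_ptr] != c[c_ptr - 1]:
--                 c_count += 1
--             c_ptr += 1
--         tot_pairs += a_count*c_count
--     return tot_pairs
-- ===== SOURCE B (Python) =====
-- def _le_count(xs, n):
--     """Number of elements of the sorted list xs that are <= n (binary search)."""
--     lo, hi = 0, len(xs)
--     while lo < hi:
--         mid = (lo + hi) // 2
--         if xs[mid] <= n:
--             lo = mid + 1
--         else:
--             hi = mid
--     return lo
--
-- def triplets(a, b, c):
--     ua = sorted(set(a))
--     uc = sorted(set(c))
--     ub = sorted(set(b))
--     a.sort()
--     b.sort()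
--     c.sort()  # keep A's in-place sorting of the three arguments
--     total = 0
--     for n in ub:
--         total += _le_count(ua, n) * _le_count(uc, n)
--     return total
-- ===== Notes on version B (the rewrite author's own statement) =====
-- stated objective: alternative
-- what changed: Replaces the coupled two-pointer monotone sweep with shared mutable pointer/counter state by independent binary searches over pre-built deduplicated sorted arrays, summing bisect-style counts per distinct b value.
import Mathlib
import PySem

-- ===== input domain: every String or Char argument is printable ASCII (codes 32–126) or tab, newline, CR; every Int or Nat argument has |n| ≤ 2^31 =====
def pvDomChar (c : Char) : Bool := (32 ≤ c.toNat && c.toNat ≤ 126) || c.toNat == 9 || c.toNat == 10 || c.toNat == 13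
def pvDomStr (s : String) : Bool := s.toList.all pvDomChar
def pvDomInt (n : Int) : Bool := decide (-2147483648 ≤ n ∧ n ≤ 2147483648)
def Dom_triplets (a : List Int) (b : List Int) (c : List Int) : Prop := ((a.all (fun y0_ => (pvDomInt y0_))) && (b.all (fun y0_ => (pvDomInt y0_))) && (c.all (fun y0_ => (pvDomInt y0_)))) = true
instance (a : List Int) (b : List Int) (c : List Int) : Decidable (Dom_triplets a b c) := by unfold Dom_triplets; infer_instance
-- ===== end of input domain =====

-- B replaces A's coupled two-pointer sweep by per-value binary searches over prebuilt deduplicated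
-- sorted arrays (alternative algorithm, same cost); both sort the three arguments in place, and the
-- equivalence proved here is about the return value (the mutation is identical: each list sorted).

-- ===== PORT A =====
-- 'while ptr < len(s) and s[ptr] <= n:' advancing the pointer and the distinct-value counter
def pvSweep (s : List Int) (n : Int) (ptr : Nat) (cnt : Int) : Nat × Int :=
  if h : ptr < s.length ∧ s.getD ptr 0 ≤ n then
    pvSweep s n (ptr + 1)
      (if ptr = 0 ∨ s.getD ptr 0 ≠ s.getD (ptr - 1) 0 then cnt + 1 else cnt)
  else (ptr, cnt)
termination_by s.length - ptr
decreasing_by obtain ⟨h1, _⟩ := h; omega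

-- one iteration of A's 'for n in b' loop; state = (a_ptr, a_count, c_ptr, c_count, tot_pairs, seen)
def pvStepA (as cs : List Int) (st : Nat × Int × Nat × Int × Int × PySem.Set Int) (n : Int) :
    Nat × Int × Nat × Int × Int × PySem.Set Int :=
  if PySem.Set.contains st.2.2.2.2.2 n then st
  else
    let seen := PySem.Set.add st.2.2.2.2.2 n
    let a2 := pvSweep as n st.1 st.2.1
    let c2 := pvSweep cs n st.2.2.1 st.2.2.2.1
    (a2.1, a2.2, c2.1, c2.2, st.2.2.2.2.1 + a2.2 * c2.2, seen)

def triplets (a : List Int) (b : List Int) (c : List Int) : Int :=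
  let as := PySem.List.sorted a (fun x => x)
  let bs := PySem.List.sorted b (fun x => x)
  let cs := PySem.List.sorted c (fun x => x)
  (bs.foldl (pvStepA as cs)
    ((0, 0, 0, 0, 0, PySem.Set.empty) : Nat × Int × Nat × Int × Int × PySem.Set Int)).2.2.2.2.1

-- ===== PORT B =====
-- _le_count: binary search 'while lo < hi' over a sorted list
def pvLeCount (xs : List Int) (n : Int) (lo hi : Nat) : Nat :=
  if lo < hi then
    let mid := (lo + hi) / 2
    if xs.getD mid 0 ≤ n then pvLeCount xs n (mid + 1) hi
    else pvLeCount xs n lo mid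
  else lo
termination_by hi - lo
decreasing_by all_goals omega

def triplets_alt (a : List Int) (b : List Int) (c : List Int) : Int :=
  let ua := PySem.List.sorted (PySem.Set.ofList a) (fun x => x)
  let uc := PySem.List.sorted (PySem.Set.ofList c) (fun x => x)
  let ub := PySem.List.sorted (PySem.Set.ofList b) (fun x => x)
  ub.foldl (fun tot n =>
    tot + (pvLeCount ua n 0 ua.length : Int) * (pvLeCount uc n 0 uc.length : Int)) 0

-- ===== PRECONDITION & SPEC =====
def Spec_triplets (a : List Int) (b : List Int) (c : List Int) (out : Int) : Prop := out = triplets_alt a b c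
instance (a : List Int) (b : List Int) (c : List Int) (out : Int) : Decidable (Spec_triplets a b c out) := by unfold Spec_triplets; infer_instance

-- ===== CLAIM (what is proved, stated in full; the proofs are below) =====
def Claim_equal_triplets : Prop := ∀ (a : List Int) (b : List Int) (c : List Int), Dom_triplets a b c → Spec_triplets a b c (triplets a b c)

-- ===== LEMMAS AND PROOFS =====

-- number of leading elements of s that are ≤ n
def pvKK (s : List Int) (n : Int) : Nat := (s.takeWhile (fun x => decide (x ≤ n))).length

-- A's loop body with the 'seen' bookkeeping stripped; state = (a_ptr, a_count, c_ptr, c_count, tot)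
def pvStepP (as cs : List Int) (st : Nat × Int × Nat × Int × Int) (n : Int) :
    Nat × Int × Nat × Int × Int :=
  let a2 := pvSweep as n st.1 st.2.1
  let c2 := pvSweep cs n st.2.2.1 st.2.2.2.1
  (a2.1, a2.2, c2.1, c2.2, st.2.2.2.2 + a2.2 * c2.2)

-- the elements of u not in seen, first occurrences, in order
def pvDistinctNew (u : List Int) (seen : PySem.Set Int) : List Int :=
  match u with
  | [] => []
  | x :: xs =>
    if PySem.Set.contains seen x then pvDistinctNew xs seen
    else x :: pvDistinctNew xs (PySem.Set.add seen x)

lemma pvFoldA_eq (as cs : List Int) :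
    ∀ (u : List Int) (seen : PySem.Set Int) (ap : Nat) (ac : Int) (cp : Nat) (cc tot : Int),
      (u.foldl (pvStepA as cs) (ap, ac, cp, cc, tot, seen)).2.2.2.2.1
        = ((pvDistinctNew u seen).foldl (pvStepP as cs) (ap, ac, cp, cc, tot)).2.2.2.2 := by
  intro u
  induction u with
  | nil => intro seen ap ac cp cc tot; rfl
  | cons x xs ih =>
    intro seen ap ac cp cc tot
    simp only [List.foldl_cons, pvStepA, pvDistinctNew]
    by_cases hc : PySem.Set.contains seen x
    · simp only [hc, if_pos]
      exact ih seen ap ac cp cc tot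
    · simp only [hc, if_neg, Bool.false_eq_true, not_false_iff, List.foldl_cons, pvStepP]
      exact ih (PySem.Set.add seen x) _ _ _ _ _

lemma mem_pvDistinctNew : ∀ (u : List Int) (seen : PySem.Set Int) (x : Int),
    x ∈ pvDistinctNew u seen ↔ x ∈ u ∧ x ∉ seen := by
  intro u
  induction u with
  | nil => simp [pvDistinctNew]
  | cons y ys ih =>
    intro seen x
    simp only [pvDistinctNew]
    by_cases hc : PySem.Set.contains seen y
    · have hy : y ∈ seen := (PySem.Set.contains_iff seen y).mp hc
      rw [if_pos hc, ih]
      constructor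
      · rintro ⟨h1, h2⟩; exact ⟨List.mem_cons_of_mem _ h1, h2⟩
      · rintro ⟨h1, h2⟩
        rcases List.mem_cons.mp h1 with h | h
        · exact absurd (h ▸ hy) h2
        · exact ⟨h, h2⟩
    · have hy : y ∉ seen := fun h => hc ((PySem.Set.contains_iff seen y).mpr h)
      rw [if_neg hc]
      simp only [List.mem_cons, ih, PySem.Set.mem_add]
      constructor
      · rintro (h | ⟨h1, h2⟩)
        · exact ⟨Or.inl h, h ▸ hy⟩
        · exact ⟨Or.inr h1, fun hm => h2 (Or.inl hm)⟩
      · rintro ⟨h1 | h1, h2⟩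
        · exact Or.inl h1
        · by_cases hx : x = y
          · exact Or.inl hx
          · exact Or.inr ⟨h1, fun hm => (by rcases hm with hm | hm; exact h2 hm; exact hx hm : False)⟩

lemma sublist_pvDistinctNew : ∀ (u : List Int) (seen : PySem.Set Int),
    List.Sublist (pvDistinctNew u seen) u := by
  intro u
  induction u with
  | nil => intro seen; simp [pvDistinctNew]
  | cons y ys ih =>
    intro seen
    simp only [pvDistinctNew]
    by_cases hc : PySem.Set.contains seen y
    · rw [if_pos hc]; exact (ih seen).cons y
    · rw [if_neg hc]; exact (ih _).cons₂ y

lemma nodup_pvDistinctNew : ∀ (u : List Int) (seen : PySem.Set Int),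
    (pvDistinctNew u seen).Nodup := by
  intro u
  induction u with
  | nil => intro seen; simp [pvDistinctNew]
  | cons y ys ih =>
    intro seen
    simp only [pvDistinctNew]
    by_cases hc : PySem.Set.contains seen y
    · rw [if_pos hc]; exact ih seen
    · rw [if_neg hc]
      refine List.nodup_cons.mpr ⟨fun hm => ?_, ih _⟩
      have := (mem_pvDistinctNew ys _ y).mp hm
      exact this.2 ((PySem.Set.mem_add _ _ _).mpr (Or.inr rfl))

lemma pvDistinctNew_sorted_eq (b : List Int) :
    pvDistinctNew (PySem.List.sorted b (fun x => x)) PySem.Set.empty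
      = PySem.List.sorted (PySem.Set.ofList b) (fun x => x) := by
  refine (PySem.List.sorted_eq_of_perm_of_pairwise_lt _ _ _ ?_ ?_).symm
  · refine (List.perm_ext_iff_of_nodup (nodup_pvDistinctNew _ _) (PySem.Set.nodup_ofList b)).mpr ?_
    intro x
    rw [mem_pvDistinctNew, PySem.Set.mem_ofList, PySem.List.mem_sorted]
    simp [PySem.Set.empty]
  · have hle : (pvDistinctNew (PySem.List.sorted b (fun x => x)) PySem.Set.empty).Pairwise (· ≤ ·) :=
      (PySem.List.sorted_pairwise b (fun x => x)).sublist (sublist_pvDistinctNew _ _)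
    have hne : (pvDistinctNew (PySem.List.sorted b (fun x => x)) PySem.Set.empty).Pairwise (· ≠ ·) :=
      nodup_pvDistinctNew _ _
    exact (hle.and hne).imp (fun h => lt_of_le_of_ne h.1 h.2)

lemma not_le_of_mem_dropWhile (n : Int) : ∀ (s : List Int), s.Pairwise (· ≤ ·) →
    ∀ x ∈ s.dropWhile (fun x => decide (x ≤ n)), ¬ x ≤ n := by
  intro s
  induction s with
  | nil => simp
  | cons h t ih =>
    intro hp x hx
    rw [List.dropWhile_cons] at hx
    by_cases hh : h ≤ n
    · rw [if_pos (by simpa using hh)] at hx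
      exact ih (List.Pairwise.of_cons hp) x hx
    · rw [if_neg (by simpa using hh)] at hx
      rcases List.mem_cons.mp hx with rfl | hxt
      · exact hh
      · have := (List.pairwise_cons.mp hp).1 x hxt
        intro hxn; exact hh (le_trans this hxn)

lemma pvKK_le_length (s : List Int) (n : Int) : pvKK s n ≤ s.length :=
  (List.takeWhile_prefix _).sublist.length_le

lemma getD_le_iff_lt_pvKK (s : List Int) (hs : s.Pairwise (· ≤ ·)) (n : Int)
    (i : Nat) (hi : i < s.length) : s.getD i 0 ≤ n ↔ i < pvKK s n := by
  have htw : s.takeWhile (fun x => decide (x ≤ n)) <+: s := List.takeWhile_prefix _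
  constructor
  · intro hle
    by_contra hnot
    have hk : pvKK s n ≤ i := by omega
    have hdw : s.getD i 0 ∈ s.dropWhile (fun x => decide (x ≤ n)) := by
      have hsplit := List.takeWhile_append_dropWhile (p := fun x => decide (x ≤ n)) (l := s)
      have hi2 : i < (s.takeWhile (fun x => decide (x ≤ n)) ++ s.dropWhile (fun x => decide (x ≤ n))).length := by
        rw [hsplit]; exact hi
      have hgoal : s.getD i 0
          = (s.takeWhile (fun x => decide (x ≤ n)) ++ s.dropWhile (fun x => decide (x ≤ n)))[i]'hi2 := by
        rw [List.getD_eq_getElem s 0 hi]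
        exact (List.getElem_of_eq hsplit hi2).symm
      rw [hgoal,
        List.getElem_append_right (by exact hk : (s.takeWhile (fun x => decide (x ≤ n))).length ≤ i)]
      exact List.getElem_mem _
    exact not_le_of_mem_dropWhile n s hs _ hdw hle
  · intro hlt
    have hlen : i < (s.takeWhile (fun x => decide (x ≤ n))).length := hlt
    have hmem : (s.takeWhile (fun x => decide (x ≤ n)))[i] ∈ s.takeWhile (fun x => decide (x ≤ n)) :=
      List.getElem_mem hlen
    have hdec := List.mem_takeWhile_imp hmem
    have heq : s.getD i 0 = (s.takeWhile (fun x => decide (x ≤ n)))[i] := by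
      rw [List.getD_eq_getElem s 0 hi]
      exact (List.IsPrefix.getElem htw hlen).symm
    rw [heq]
    exact of_decide_eq_true hdec

lemma pvCard_take_succ (s : List Int) (hs : s.Pairwise (· ≤ ·)) (ap : Nat) (h : ap < s.length)
    (ac : Int) (hac : ac = ((s.take ap).toFinset.card : Int)) :
    (if ap = 0 ∨ s.getD ap 0 ≠ s.getD (ap - 1) 0 then ac + 1 else ac)
      = ((s.take (ap + 1)).toFinset.card : Int) := by
  have hpw := List.pairwise_iff_getElem.mp hs
  have htake : s.take (ap + 1) = s.take ap ++ [s[ap]] := by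
    rw [List.take_succ, List.getElem?_eq_getElem h]; rfl
  have hfin : (s.take (ap + 1)).toFinset = insert s[ap] (s.take ap).toFinset := by
    rw [htake]; ext y
    simp only [List.mem_toFinset, List.mem_append, List.mem_singleton, Finset.mem_insert]
    tauto
  have hmem_take : ∀ i (hi : i < ap), s[i]'(by omega) ∈ s.take ap := by
    intro i hi
    have hi' : i < (s.take ap).length := by rw [List.length_take]; omega
    have : (s.take ap)[i] = s[i]'(by omega) := List.getElem_take
    exact this ▸ List.getElem_mem hi'
  split_ifs with hcond
  · -- new distinct value: s[ap] not among the first ap elements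
    have hnot : s[ap] ∉ (s.take ap).toFinset := by
      rw [List.mem_toFinset]
      intro hm
      rcases List.mem_take_iff_getElem.mp hm with ⟨i, hilt, hieq⟩
      have hiap : i < ap := by omega
      rcases hcond with h0 | hne
      · omega
      · have h1 : ap - 1 < s.length := by omega
        have hle1 : s[i]'(by omega) ≤ s[ap - 1] := by
          rcases Nat.lt_or_ge i (ap - 1) with hlt | hge
          · exact hpw i (ap - 1) (by omega) h1 hlt
          · have hieq1 : i = ap - 1 := by omega
            subst hieq1; exact le_refl _
        have hle2 : s[ap - 1] ≤ s[ap] := by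
          rcases Nat.eq_zero_or_pos ap with h0 | hpos
          · omega
          · exact hpw (ap - 1) ap h1 h ((by omega : ap - 1 < ap))
        have : s[ap - 1] = s[ap] := le_antisymm hle2 (hieq ▸ hle1)
        exact hne (by rw [List.getD_eq_getElem s 0 h, List.getD_eq_getElem s 0 h1]; exact this.symm)
    rw [hac, hfin, Finset.card_insert_of_notMem hnot]
    push_cast; ring
  · -- repeated value: s[ap] = s[ap-1] already counted
    push_neg at hcond
    obtain ⟨h0, heq⟩ := hcond
    have h1 : ap - 1 < s.length := by omega
    have heq' : s[ap] = s[ap - 1] := by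
      rw [List.getD_eq_getElem s 0 h, List.getD_eq_getElem s 0 h1] at heq
      exact not_not.mp (by simpa using heq)
    have hmem : s[ap] ∈ (s.take ap).toFinset := by
      rw [List.mem_toFinset, heq']
      exact hmem_take (ap - 1) (by omega)
    rw [hac, hfin, Finset.card_insert_of_mem hmem]

lemma pvSweep_eq (s : List Int) (hs : s.Pairwise (· ≤ ·)) (n : Int) :
    ∀ (m ap : Nat) (ac : Int), s.length - ap = m → ap ≤ s.length →
      (∀ i, i < ap → s.getD i 0 ≤ n) → ac = ((s.take ap).toFinset.card : Int) →
      pvSweep s n ap ac = (pvKK s n, ((s.take (pvKK s n)).toFinset.card : Int)) := by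
  intro m
  induction m with
  | zero =>
    intro ap ac hm hle hpre hac
    have hap : ap = s.length := by omega
    rw [pvSweep, dif_neg (by omega : ¬ (ap < s.length ∧ s.getD ap 0 ≤ n))]
    have hkk : pvKK s n = ap := by
      have h1 : pvKK s n ≤ s.length := pvKK_le_length s n
      by_contra hne
      have h2 : pvKK s n < s.length := by omega
      have := (getD_le_iff_lt_pvKK s hs n _ h2).mp (hpre _ (by omega))
      omega
    rw [hkk, hac]
  | succ m ih =>
    intro ap ac hm hle hpre hac
    rw [pvSweep]
    by_cases h : ap < s.length ∧ s.getD ap 0 ≤ n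
    · rw [dif_pos h]
      refine ih (ap + 1) _ (by omega) (by omega) ?_ ?_
      · intro i hi
        rcases Nat.lt_or_ge i ap with hlt | hge
        · exact hpre i hlt
        · have : i = ap := by omega
          exact this ▸ h.2
      · exact pvCard_take_succ s hs ap h.1 ac hac
    · rw [dif_neg h]
      have hap : pvKK s n = ap := by
        by_contra hne
        rcases Nat.lt_or_ge (pvKK s n) ap with hlt | hge
        · have h2 : pvKK s n < s.length := lt_of_lt_of_le hlt hle
          have := (getD_le_iff_lt_pvKK s hs n _ h2).mp (hpre _ hlt)
          omega
        · have hlt : ap < pvKK s n := by omega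
          have h2 : ap < s.length := lt_of_lt_of_le hlt (pvKK_le_length s n)
          exact h ⟨h2, (getD_le_iff_lt_pvKK s hs n ap h2).mpr hlt⟩
      rw [hap, hac]

lemma pvLeCount_eq_pvKK (xs : List Int) (hs : xs.Pairwise (· ≤ ·)) (n : Int) :
    ∀ (m lo hi : Nat), hi - lo = m → lo ≤ hi → hi ≤ xs.length →
      (∀ i, i < lo → xs.getD i 0 ≤ n) →
      (∀ i, hi ≤ i → i < xs.length → ¬ xs.getD i 0 ≤ n) →
      pvLeCount xs n lo hi = pvKK xs n := by
  intro m
  induction m using Nat.strong_induction_on with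
  | _ m ih =>
    intro lo hi hm hlh hhi hlow hup
    rw [pvLeCount]
    by_cases h : lo < hi
    · rw [if_pos h]
      have hmid1 : lo ≤ (lo + hi) / 2 := by omega
      have hmid2 : (lo + hi) / 2 < hi := by omega
      have hmidlen : (lo + hi) / 2 < xs.length := by omega
      have hpw := List.pairwise_iff_getElem.mp hs
      by_cases hv : xs.getD ((lo + hi) / 2) 0 ≤ n
      · rw [if_pos hv]
        refine ih (hi - ((lo + hi) / 2 + 1)) (by omega) _ _ rfl (by omega) hhi ?_ hup
        intro i hi'
        rcases Nat.lt_or_ge i lo with hlt | hge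
        · exact hlow i hlt
        · have hilen : i < xs.length := by omega
          rcases Nat.lt_or_ge i ((lo + hi) / 2) with hlt2 | hge2
          · have : xs[i] ≤ xs[(lo + hi) / 2] := hpw i _ hilen hmidlen hlt2
            rw [List.getD_eq_getElem xs 0 hilen]
            rw [List.getD_eq_getElem xs 0 hmidlen] at hv
            exact le_trans this hv
          · have : i = (lo + hi) / 2 := by omega
            exact this ▸ hv
      · rw [if_neg hv]
        refine ih ((lo + hi) / 2 - lo) (by omega) _ _ rfl (by omega) (by omega) hlow ?_
        intro i hge hilen
        rcases Nat.lt_or_ge ((lo + hi) / 2) i with hlt | hge2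
        · have : xs[(lo + hi) / 2] ≤ xs[i] := hpw _ i hmidlen hilen hlt
          rw [List.getD_eq_getElem xs 0 hilen]
          rw [List.getD_eq_getElem xs 0 hmidlen] at hv
          intro hle; exact hv (le_trans this hle)
        · have : i = (lo + hi) / 2 := by omega
          exact this ▸ hv
    · rw [if_neg h]
      have hlo : lo = hi := by omega
      by_contra hne
      rcases Nat.lt_or_ge (pvKK xs n) lo with hlt | hge
      · have h2 : pvKK xs n < xs.length := by omega
        have := (getD_le_iff_lt_pvKK xs hs n _ h2).mp (hlow _ hlt)
        omega
      · have hlt : lo < pvKK xs n := by omega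
        have h2 : lo < xs.length := lt_of_lt_of_le hlt (pvKK_le_length xs n)
        exact hup lo (by omega) h2 ((getD_le_iff_lt_pvKK xs hs n lo h2).mpr hlt)

lemma toFinset_takeWhile_sorted (s : List Int) (hs : s.Pairwise (· ≤ ·)) (n : Int) :
    (s.takeWhile (fun x => decide (x ≤ n))).toFinset = s.toFinset.filter (· ≤ n) := by
  ext y
  simp only [List.mem_toFinset, Finset.mem_filter]
  constructor
  · intro hy
    have hp := List.mem_takeWhile_imp hy
    exact ⟨(List.takeWhile_prefix _).subset hy, by simpa using hp⟩
  · rintro ⟨hmem, hle⟩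
    have := List.takeWhile_append_dropWhile (p := fun x => decide (x ≤ n)) (l := s)
    rw [← this] at hmem
    rcases List.mem_append.mp hmem with h | h
    · exact h
    · exact absurd hle (not_le_of_mem_dropWhile n s hs y h)

lemma pvCountA_eq (s₀ : List Int) (n : Int) :
    ((PySem.List.sorted s₀ (fun x => x)).take (pvKK (PySem.List.sorted s₀ (fun x => x)) n)).toFinset.card
      = (s₀.toFinset.filter (· ≤ n)).card := by
  have hs : (PySem.List.sorted s₀ (fun x => x)).Pairwise (· ≤ ·) :=
    PySem.List.sorted_pairwise s₀ (fun x => x)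
  have htake : (PySem.List.sorted s₀ (fun x => x)).take (pvKK (PySem.List.sorted s₀ (fun x => x)) n)
      = (PySem.List.sorted s₀ (fun x => x)).takeWhile (fun x => decide (x ≤ n)) :=
    (List.prefix_iff_eq_take.mp (List.takeWhile_prefix _)).symm
  rw [htake, toFinset_takeWhile_sorted _ hs n]
  congr 1
  ext y
  simp [PySem.List.mem_sorted]

lemma pvCountB_eq (s₀ : List Int) (n : Int) :
    pvLeCount (PySem.List.sorted (PySem.Set.ofList s₀) (fun x => x)) n 0
        (PySem.List.sorted (PySem.Set.ofList s₀) (fun x => x)).length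
      = (s₀.toFinset.filter (· ≤ n)).card := by
  set ua := PySem.List.sorted (PySem.Set.ofList s₀) (fun x => x) with hua
  have hs : ua.Pairwise (· ≤ ·) := PySem.List.sorted_pairwise _ (fun x => x)
  have hnd : ua.Nodup := ((PySem.List.sorted_perm (PySem.Set.ofList s₀) (fun x => x) false).nodup_iff).mpr (PySem.Set.nodup_ofList s₀)
  rw [pvLeCount_eq_pvKK ua hs n (ua.length - 0) 0 ua.length rfl (by omega) (le_refl _)
      (by omega) (by omega)]
  have hndtw : (ua.takeWhile (fun x => decide (x ≤ n))).Nodup :=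
    hnd.sublist (List.takeWhile_prefix _).sublist
  have : pvKK ua n = (ua.takeWhile (fun x => decide (x ≤ n))).toFinset.card := by
    rw [List.toFinset_card_of_nodup hndtw]; rfl
  rw [this, toFinset_takeWhile_sorted ua hs n]
  congr 1
  have : ua.toFinset = s₀.toFinset := by
    ext x
    simp only [List.mem_toFinset]
    rw [hua, PySem.List.mem_sorted, PySem.Set.mem_ofList]
  rw [this]

lemma pvFold_main (as cs ua uc : List Int)
    (hsA : as.Pairwise (· ≤ ·)) (hsC : cs.Pairwise (· ≤ ·))
    (hA : ∀ n : Int, ((as.take (pvKK as n)).toFinset.card) = pvLeCount ua n 0 ua.length)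
    (hC : ∀ n : Int, ((cs.take (pvKK cs n)).toFinset.card) = pvLeCount uc n 0 uc.length) :
    ∀ (u : List Int), u.Pairwise (· < ·) →
      ∀ (ap : Nat) (ac : Int) (cp : Nat) (cc tot : Int),
        ap ≤ as.length → cp ≤ cs.length →
        (∀ x ∈ u, ∀ i, i < ap → as.getD i 0 ≤ x) →
        (∀ x ∈ u, ∀ i, i < cp → cs.getD i 0 ≤ x) →
        ac = ((as.take ap).toFinset.card : Int) → cc = ((cs.take cp).toFinset.card : Int) →
        (u.foldl (pvStepP as cs) (ap, ac, cp, cc, tot)).2.2.2.2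
          = u.foldl (fun t n =>
              t + (pvLeCount ua n 0 ua.length : Int) * (pvLeCount uc n 0 uc.length : Int)) tot := by
  intro u
  induction u with
  | nil => intros; rfl
  | cons n u' ih =>
    intro hpw ap ac cp cc tot hap hcp hpreA hpreC hac hcc
    have hn : n ∈ n :: u' := List.mem_cons_self
    have hswA := pvSweep_eq as hsA n (as.length - ap) ap ac rfl hap (fun i hi => hpreA n hn i hi) hac
    have hswC := pvSweep_eq cs hsC n (cs.length - cp) cp cc rfl hcp (fun i hi => hpreC n hn i hi) hcc
    simp only [List.foldl_cons, pvStepP, hswA, hswC]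
    have hrel := (List.pairwise_cons.mp hpw).1
    have htail := (List.pairwise_cons.mp hpw).2
    rw [ih htail (pvKK as n) _ (pvKK cs n) _ _
        (pvKK_le_length as n) (pvKK_le_length cs n)
        (fun x hx i hi => le_trans
          ((getD_le_iff_lt_pvKK as hsA n i (lt_of_lt_of_le hi (pvKK_le_length as n))).mpr hi)
          (le_of_lt (hrel x hx)))
        (fun x hx i hi => le_trans
          ((getD_le_iff_lt_pvKK cs hsC n i (lt_of_lt_of_le hi (pvKK_le_length cs n))).mpr hi)
          (le_of_lt (hrel x hx)))
        rfl rfl]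
    congr 2
    rw [← hA n, ← hC n]

-- ===== VERDICT (by name: the statement is the Claim_ definition above) =====
theorem triplets_spec : Claim_equal_triplets := by
  intro a b c _
  simp only [Spec_triplets, triplets, triplets_alt]
  rw [pvFoldA_eq, pvDistinctNew_sorted_eq b]
  have h0a : ((0 : Int)) = (((PySem.List.sorted a (fun x => x)).take 0).toFinset.card : Int) := by simp
  have h0c : ((0 : Int)) = (((PySem.List.sorted c (fun x => x)).take 0).toFinset.card : Int) := by simp
  exact (pvFold_main (PySem.List.sorted a (fun x => x)) (PySem.List.sorted c (fun x => x))
    (PySem.List.sorted (PySem.Set.ofList a) (fun x => x))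
    (PySem.List.sorted (PySem.Set.ofList c) (fun x => x))
    (PySem.List.sorted_pairwise a (fun x => x)) (PySem.List.sorted_pairwise c (fun x => x))
    (fun n => by rw [pvCountA_eq a n, ← pvCountB_eq a n])
    (fun n => by rw [pvCountA_eq c n, ← pvCountB_eq c n])
    (PySem.List.sorted (PySem.Set.ofList b) (fun x => x))
    (PySem.List.sorted_ofList_pairwise_lt b)
    0 0 0 0 0 (by omega) (by omega)
    (fun x _ i hi => absurd hi (by omega)) (fun x _ i hi => absurd hi (by omega))
    h0a h0c)
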